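-- pv_equiv track=rewrite | github.com/lephubui/command-code | youtube/python/problems/count_pairs_of_three_array.py | solution
-- ===== SOURCE A (Python) =====
-- from collections import Counter
--
-- def solution(s):
--     map_s = Counter(s)
--     counter = 0
--     sum_map =sum(map_s.values())
--     for k in map_s:
--         n = map_s[k]
--         compute_pairs = n*(n-1) // 2
--         counter += compute_pairs*(sum_map - map_s[k])
--
--     return counter
-- ===== SOURCE B (Python) =====
-- def solution(s):
--     # One streaming pass: P = equal index-pairs seen so far, T = equal index-triples
--     # seen so far. By inclusion-exclusion the answer is (N-2)*P - 3*T: each equal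
--     # pair combines with N-2 other positions, minus the 3 ways each equal triple
--     # arises as an equal pair plus one of its own members.
--     counts = {}
--     pairs = 0
--     triples = 0
--     for x in s:
--         c = counts.get(x, 0)
--         pairs += c
--         triples += c * (c - 1) // 2
--         counts[x] = c + 1
--     return (len(s) - 2) * pairs - 3 * triples
-- ===== Notes on version B (the rewrite author's own statement) =====
-- stated objective: alternative
-- what changed: Replaces A's two-phase Counter-then-loop-over-distinct-values computation of sum C(n,2)*(N-n) by a single streaming pass that increments running equal-pair and equal-triple counters per element and returns (N-2)*pairs - 3*triples via inclusion-exclusion; no per-value group terms are ever formed.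
import Mathlib
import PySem

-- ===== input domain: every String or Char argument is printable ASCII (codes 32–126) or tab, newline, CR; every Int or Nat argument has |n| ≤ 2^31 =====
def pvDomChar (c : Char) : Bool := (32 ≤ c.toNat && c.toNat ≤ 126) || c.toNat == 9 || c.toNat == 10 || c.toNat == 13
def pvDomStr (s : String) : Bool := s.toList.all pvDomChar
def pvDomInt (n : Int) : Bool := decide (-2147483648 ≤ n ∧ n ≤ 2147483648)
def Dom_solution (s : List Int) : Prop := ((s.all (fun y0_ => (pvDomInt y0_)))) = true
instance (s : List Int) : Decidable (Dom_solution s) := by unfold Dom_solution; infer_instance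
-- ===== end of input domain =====

-- B replaces A's Counter-then-per-value loop by one streaming pass keeping running
-- equal-pair and equal-triple counters and returning (N-2)*P - 3*T (alternative algorithm, same values).

-- ===== PORT A =====
def solution (s : List Int) : Int :=
  let map_s := PySem.Dict.counter s
  let counter : Int := 0
  let sum_map := map_s.values.sum
  map_s.keys.foldl (fun counter k =>
    let n := map_s.getD k 0
    let compute_pairs := PySem.Int.floordiv (n * (n - 1)) 2
    counter + compute_pairs * (sum_map - map_s.getD k 0)) counter

-- ===== PORT B =====
def solution_alt (s : List Int) : Int :=
  let r := s.foldl (fun (st : PySem.Dict Int Int × Int × Int) x =>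
    let c := st.1.getD x 0
    (st.1.insert x (c + 1), st.2.1 + c, st.2.2 + PySem.Int.floordiv (c * (c - 1)) 2))
    (PySem.Dict.empty, 0, 0)
  ((s.length : Int) - 2) * r.2.1 - 3 * r.2.2

-- ===== PRECONDITION & SPEC =====
def Spec_solution (s : List Int) (out : Int) : Prop := out = solution_alt s
instance (s : List Int) (out : Int) : Decidable (Spec_solution s out) := by unfold Spec_solution; infer_instance

-- ===== CLAIM (what is proved, stated in full; the proofs are below) =====
def Claim_equal_solution : Prop := ∀ (s : List Int), Dom_solution s → Spec_solution s (solution s)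

-- ===== LEMMAS AND PROOFS =====

-- B's loop body, named for the proofs
def pvStep (st : PySem.Dict Int Int × Int × Int) (x : Int) : PySem.Dict Int Int × Int × Int :=
  let c := st.1.getD x 0
  (st.1.insert x (c + 1), st.2.1 + c, st.2.2 + PySem.Int.floordiv (c * (c - 1)) 2)

theorem pvStep_eq (s : List Int) : solution_alt s =
    ((s.length : Int) - 2) * (s.foldl pvStep (PySem.Dict.empty, 0, 0)).2.1
      - 3 * (s.foldl pvStep (PySem.Dict.empty, 0, 0)).2.2 := rfl

-- the dict component of B's fold is exactly the counter-building fold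
theorem pv_fst_fold (l : List Int) : ∀ (d : PySem.Dict Int Int) (P T : Int),
    (l.foldl pvStep (d, P, T)).1 = l.foldl (fun d x => d.insert x (d.getD x 0 + 1)) d := by
  induction l with
  | nil => intro d P T; rfl
  | cons x xs ih => intro d P T; exact ih _ _ _

theorem pv_fst_counter (l : List Int) :
    (l.foldl pvStep (PySem.Dict.empty, 0, 0)).1 = PySem.Dict.counter l := by
  rw [pv_fst_fold]; exact PySem.Dict.foldl_insert_getD_add_one_eq_counter l

-- floordiv(c*(c-1), 2) for a Nat-cast c is the binomial coefficient C(c,2)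
theorem pv_c2 (c : Nat) :
    PySem.Int.floordiv ((c : Int) * ((c : Int) - 1)) 2 = (c.choose 2 : Int) := by
  cases c with
  | zero => decide
  | succ m =>
    have h : ((m + 1 : Nat) : Int) * (((m + 1 : Nat) : Int) - 1) = (((m + 1) * m : Nat) : Int) := by
      push_cast; ring
    rw [h]
    rw [show (2 : Int) = ((2 : Nat) : Int) from rfl, PySem.Int.floordiv_natCast]
    congr 1
    rw [Nat.choose_two_right]
    simp

-- replacing the value at one key of a duplicate-free key list changes the sum by the difference there
theorem pv_sum_update (S : List Int) (hS : S.Nodup) (x : Int) (hx : x ∈ S) (f g : Int → Int)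
    (hfg : ∀ k ∈ S, k ≠ x → g k = f k) :
    (S.map g).sum = (S.map f).sum + (g x - f x) := by
  induction S with
  | nil => cases hx
  | cons y ys ih =>
    rcases List.mem_cons.1 hx with rfl | hx'
    · have hrest : ∀ k ∈ ys, g k = f k := fun k hk =>
        hfg k (List.mem_cons_of_mem _ hk) (fun h => (List.nodup_cons.1 hS).1 (h ▸ hk))
      simp only [List.map_cons, List.sum_cons]
      rw [List.map_congr_left hrest]; ring
    · have hyx : y ≠ x := fun h => (List.nodup_cons.1 hS).1 (h ▸ hx')
      simp only [List.map_cons, List.sum_cons]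
      rw [hfg y (List.mem_cons_self ..) hyx,
        ih (List.nodup_cons.1 hS).2 hx' (fun k hk hne => hfg k (List.mem_cons_of_mem _ hk) hne)]
      ring

-- appending one element x to l: the per-distinct-value sum of f(count) grows by the change at x
theorem pv_sum_step (l : List Int) (x : Int) (f : Nat → Int) (hf0 : f 0 = 0) (hf1 : f 1 = 0) :
    ((PySem.Set.ofList (l ++ [x])).map (fun k => f ((l ++ [x]).count k))).sum
      = ((PySem.Set.ofList l).map (fun k => f (l.count k))).sum
        + (f (l.count x + 1) - f (l.count x)) := by
  have hset : PySem.Set.ofList (l ++ [x]) = PySem.Set.add (PySem.Set.ofList l) x := by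
    rw [PySem.Set.ofList_eq_foldl, List.foldl_append]; rfl
  have hcount_ne : ∀ k : Int, k ≠ x → (l ++ [x]).count k = l.count k := by
    intro k hk
    rw [List.count_append, List.count_eq_zero.2 (show k ∉ [x] by simp [hk]), Nat.add_zero]
  have hcount_x : (l ++ [x]).count x = l.count x + 1 := by
    rw [List.count_append]; simp
  by_cases hx : x ∈ PySem.Set.ofList l
  · have hadd : PySem.Set.add (PySem.Set.ofList l) x = PySem.Set.ofList l := by
      simp [PySem.Set.add, PySem.Set.contains, hx]
    rw [hset, hadd,
      pv_sum_update (PySem.Set.ofList l) (PySem.Set.nodup_ofList (xs := l)) x hx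
        (fun k => f (l.count k)) (fun k => f ((l ++ [x]).count k))
        (fun k _ hne => by simpa using congrArg f (hcount_ne k hne)),
      hcount_x]
  · have hxl : x ∉ l := fun h => hx ((PySem.Set.mem_ofList ..).2 h)
    have hadd : PySem.Set.add (PySem.Set.ofList l) x = PySem.Set.ofList l ++ [x] := by
      simp [PySem.Set.add, PySem.Set.contains, hx]
    have hcx : l.count x = 0 := List.count_eq_zero.2 hxl
    rw [hset, hadd, List.map_append, List.sum_append,
      List.map_congr_left (fun k hk => by
        have hkx : k ≠ x := fun h => hxl ((PySem.Set.mem_ofList ..).1 (h ▸ hk))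
        simpa using congrArg f (hcount_ne k hkx))]
    simp [hcx, hf0, hf1]

-- running P and T are the per-value binomial sums over the distinct values
theorem pv_PT (l : List Int) :
    (l.foldl pvStep (PySem.Dict.empty, 0, 0)).2.1
      = ((PySem.Set.ofList l).map (fun k => ((l.count k).choose 2 : Int))).sum ∧
    (l.foldl pvStep (PySem.Dict.empty, 0, 0)).2.2
      = ((PySem.Set.ofList l).map (fun k => ((l.count k).choose 3 : Int))).sum := by
  induction l using List.reverseRecOn with
  | nil => constructor <;> rfl
  | append_singleton l x ih =>
    have hstep : (l ++ [x]).foldl pvStep (PySem.Dict.empty, 0, 0)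
        = pvStep (l.foldl pvStep (PySem.Dict.empty, 0, 0)) x := List.foldl_append ..
    have hc : (l.foldl pvStep (PySem.Dict.empty, 0, 0)).1.getD x 0 = (l.count x : Int) := by
      rw [pv_fst_counter]; exact PySem.Dict.getD_counter l x
    have hch2 : ∀ c : Nat, ((c + 1).choose 2 : Int) - (c.choose 2 : Int) = (c : Int) := by
      intro c
      have h := Nat.choose_succ_succ' c 1
      rw [Nat.choose_one_right] at h
      norm_num at h
      rw [h]; push_cast; ring
    have hch3 : ∀ c : Nat, ((c + 1).choose 3 : Int) - (c.choose 3 : Int) = (c.choose 2 : Int) := by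
      intro c
      have h := Nat.choose_succ_succ' c 2
      norm_num at h
      rw [h]; push_cast; ring
    constructor
    · rw [hstep]
      show (l.foldl pvStep (PySem.Dict.empty, 0, 0)).2.1
          + (l.foldl pvStep (PySem.Dict.empty, 0, 0)).1.getD x 0 = _
      rw [hc, ih.1, pv_sum_step l x (fun n => (n.choose 2 : Int)) (by decide) (by decide),
        hch2]
    · rw [hstep]
      show (l.foldl pvStep (PySem.Dict.empty, 0, 0)).2.2
          + PySem.Int.floordiv
            ((l.foldl pvStep (PySem.Dict.empty, 0, 0)).1.getD x 0
              * ((l.foldl pvStep (PySem.Dict.empty, 0, 0)).1.getD x 0 - 1)) 2 = _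
      rw [hc, pv_c2, ih.2, pv_sum_step l x (fun n => (n.choose 3 : Int)) (by decide) (by decide),
        hch3]

-- the per-value identity: C(n,2)*(N-n) = (N-2)*C(n,2) - 3*C(n,3)
theorem pv_value_id (n : Nat) (N : Int) :
    (n.choose 2 : Int) * (N - (n : Int)) = (N - 2) * (n.choose 2 : Int) - 3 * (n.choose 3 : Int) := by
  rcases Nat.lt_or_ge n 2 with h | h
  · interval_cases n <;> simp
  · have key : (n.choose 3) * 3 = n.choose 2 * (n - 2) := Nat.choose_succ_right_eq n 2
    have hc : ((n - 2 : Nat) : Int) = (n : Int) - 2 := by omega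
    have keyZ : (n.choose 3 : Int) * 3 = (n.choose 2 : Int) * ((n : Int) - 2) := by
      have := congrArg (fun m : Nat => (m : Int)) key
      push_cast at this
      rw [hc] at this; exact this
    nlinarith [keyZ]

-- A's value as the per-value sum over the distinct values
theorem pv_A_eq (s : List Int) :
    solution s = ((PySem.Set.ofList s).map (fun k =>
      PySem.Int.floordiv ((s.count k : Int) * ((s.count k : Int) - 1)) 2
        * ((s.length : Int) - (s.count k : Int)))).sum := by
  have hv : (PySem.Dict.counter s).values.sum = (s.length : Int) := by
    have hperm : (PySem.Set.ofList s).Perm s.dedup := by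
      rw [List.perm_ext_iff_of_nodup (PySem.Set.nodup_ofList (xs := s)) (List.nodup_dedup s)]
      intro v
      rw [PySem.Set.mem_ofList, List.mem_dedup]
    simp only [PySem.Dict.values, PySem.Dict.items_counter, List.map_map]
    have : ((PySem.Set.ofList s).map (fun k => (s.count k : Int))).sum = (s.length : Int) := by
      rw [(hperm.map _).sum_eq]
      rw [show (fun k => ((s.count k : Int))) = (fun n : Nat => (n : Int)) ∘ (s.count ·) from rfl,
        ← List.map_map, ← Nat.cast_list_sum, List.sum_map_count_dedup_eq_length]
    simpa [Function.comp] using this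
  simp only [solution, PySem.Dict.getD_counter]
  rw [PySem.List.foldl_add (g := fun k =>
    PySem.Int.floordiv ((s.count k : Int) * ((s.count k : Int) - 1)) 2
      * ((PySem.Dict.counter s).values.sum - (s.count k : Int)))]
  rw [hv, zero_add, PySem.Dict.keys_counter]

-- ===== VERDICT (by name: the statement is the Claim_ definition above) =====
theorem solution_spec : Claim_equal_solution := by
  intro s _
  unfold Spec_solution
  rw [pv_A_eq, pvStep_eq, (pv_PT s).1, (pv_PT s).2]
  rw [List.map_congr_left (fun k _ => by
    rw [pv_c2 (s.count k), pv_value_id (s.count k) (s.length : Int)])]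
  rw [List.map_congr_left (l := PySem.Set.ofList s)
    (g := fun k => ((s.length : Int) - 2) * ((s.count k).choose 2 : Int)
      + (-3) * ((s.count k).choose 3 : Int)) (fun k _ => by ring)]
  rw [PySem.List.sum_map_add_int, List.sum_map_mul_left, List.sum_map_mul_left]
  ring
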